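-- pv_equiv track=rewrite | github.com/YuqiChen4188/Steering-tooloveruse | steering_scripts/build_single_turn_math_steering_vectors.py | extract_unique_instruction
-- ===== SOURCE A (Python) =====
-- from typing import Any
--
-- def extract_unique_instruction(pair_data: list[dict[str, Any]], label: str) -> str:
--     if not isinstance(pair_data, list) or not pair_data:
--         raise ValueError(f"{label} pair data must be a non-empty list.")
--     instructions = {item.get("instruction", "").strip() for item in pair_data}
--     instructions.discard("")
--     if len(instructions) != 1:
--         raise ValueError(f"{label} pair data must contain exactly one shared instruction.")
--     return next(iter(instructions))
-- ===== SOURCE B (Python) =====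
-- def extract_unique_instruction(pair_data: list, label: str) -> str:
--     if not isinstance(pair_data, list) or not pair_data:
--         raise ValueError(f"{label} pair data must be a non-empty list.")
--     found = None
--     conflict = False
--     for item in pair_data:
--         s = item.get("instruction", "").strip()
--         if s:
--             if found is None:
--                 found = s
--             elif s != found:
--                 conflict = True
--     if found is None or conflict:
--         raise ValueError(f"{label} pair data must contain exactly one shared instruction.")
--     return found
-- ===== Notes on version B (the rewrite author's own statement) =====
-- stated objective: alternative
-- what changed: B replaces A's set comprehension + discard('') + cardinality test with a single accumulator pass keeping the first non-empty stripped instruction and a conflict flag, raising the same ValueErrors after the full pass.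
-- outside the precondition, e.g. on extract_unique_instruction([], 'train'): A raises ValueError, B raises ValueError; on extract_unique_instruction([{'instruction': 'a'}, {'instruction': 'b'}], 'train'): A raises ValueError, B raises ValueError
import Mathlib
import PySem

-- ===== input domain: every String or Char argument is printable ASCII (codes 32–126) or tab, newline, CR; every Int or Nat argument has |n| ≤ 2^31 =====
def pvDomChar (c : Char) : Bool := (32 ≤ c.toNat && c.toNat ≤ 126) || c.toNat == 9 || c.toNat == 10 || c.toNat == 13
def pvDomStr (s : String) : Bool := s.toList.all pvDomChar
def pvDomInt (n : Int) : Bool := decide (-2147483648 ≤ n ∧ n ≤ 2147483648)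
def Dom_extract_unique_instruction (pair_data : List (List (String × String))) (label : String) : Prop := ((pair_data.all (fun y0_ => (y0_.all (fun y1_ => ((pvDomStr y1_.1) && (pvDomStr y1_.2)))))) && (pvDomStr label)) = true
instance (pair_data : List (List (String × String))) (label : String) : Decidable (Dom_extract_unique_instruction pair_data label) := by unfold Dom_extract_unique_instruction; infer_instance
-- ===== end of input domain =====

-- B replaces A's set comprehension + discard + cardinality check by a single accumulator pass
-- (first non-empty instruction + conflict flag); objective: alternative decomposition, same cost.

-- shared helper: item.get("instruction", "").strip()
def pvStripInstr (item : List (String × String)) : String :=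
  PySem.Str.strip (PySem.Dict.getD ⟨item⟩ "instruction" "")

-- ===== PORT A =====
def extract_unique_instruction (pair_data : List (List (String × String))) (label : String) : String :=
  if pair_data = [] then ""   -- Python: raise ValueError (excluded by Pre_)
  else
    let instructions := PySem.Set.discard (PySem.Set.ofList (pair_data.map pvStripInstr)) ""
    if instructions.length = 1 then instructions.headD ""
    else ""                    -- Python: raise ValueError (excluded by Pre_)

-- ===== PORT B =====
def pvStepB (st : Option String × Bool) (item : List (String × String)) : Option String × Bool :=
  let s := pvStripInstr item
  if s = "" then st
  else match st.1 with
    | none => (some s, st.2)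
    | some t => (some t, st.2 || decide (s ≠ t))

def extract_unique_instruction_alt (pair_data : List (List (String × String))) (label : String) : String :=
  if pair_data = [] then ""   -- Python: raise ValueError (excluded by Pre_)
  else
    match pair_data.foldl pvStepB (none, false) with
    | (some s, false) => s
    | _ => ""                  -- Python: raise ValueError (excluded by Pre_)

-- ===== PRECONDITION & SPEC =====
-- Pre_ excludes exactly the inputs where the Python raises ValueError: the empty list, and
-- lists whose distinct non-empty stripped instruction values do not number exactly one.
def Pre_extract_unique_instruction (pair_data : List (List (String × String))) (label : String) : Prop :=
  pair_data ≠ [] ∧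
  (PySem.Set.discard (PySem.Set.ofList (pair_data.map pvStripInstr)) "").length = 1
instance (pair_data : List (List (String × String))) (label : String) : Decidable (Pre_extract_unique_instruction pair_data label) := by unfold Pre_extract_unique_instruction; infer_instance
def pvWitness_extract_unique_instruction : (List (List (String × String))) × String :=
  ([[("instruction", " do x ")], [("other", "y")], [("instruction", "do x")]], "train")

def Spec_extract_unique_instruction (pair_data : List (List (String × String))) (label : String) (out : String) : Prop := out = extract_unique_instruction_alt pair_data label
instance (pair_data : List (List (String × String))) (label : String) (out : String) : Decidable (Spec_extract_unique_instruction pair_data label out) := by unfold Spec_extract_unique_instruction; infer_instance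

-- ===== CLAIM (what is proved, stated in full; the proofs are below) =====
def Claim_equal_extract_unique_instruction : Prop := ∀ (pair_data : List (List (String × String))) (label : String), Dom_extract_unique_instruction pair_data label → Pre_extract_unique_instruction pair_data label → Spec_extract_unique_instruction pair_data label (extract_unique_instruction pair_data label)

-- ===== LEMMAS AND PROOFS =====

-- once `found = some u`, a list whose stripped values are all "" or u leaves the state unchanged
lemma foldl_stepB_some (l : List (List (String × String))) (u : String)
    (h : ∀ x ∈ l, pvStripInstr x = "" ∨ pvStripInstr x = u) :
    l.foldl pvStepB (some u, false) = (some u, false) := by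
  induction l with
  | nil => rfl
  | cons x l ih =>
    have hx := h x (by simp)
    have hrest : ∀ y ∈ l, pvStripInstr y = "" ∨ pvStripInstr y = u :=
      fun y hy => h y (by simp [hy])
    rcases hx with hx | hx <;>
      simp [List.foldl_cons, pvStepB, hx, ih hrest]

-- the whole fold from the initial state lands on (some u, false)
lemma foldl_stepB_none (l : List (List (String × String))) (u : String)
    (hu : u ≠ "")
    (h : ∀ x ∈ l, pvStripInstr x = "" ∨ pvStripInstr x = u)
    (hmem : ∃ x ∈ l, pvStripInstr x = u) :
    l.foldl pvStepB (none, false) = (some u, false) := by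
  induction l with
  | nil => simp at hmem
  | cons x l ih =>
    have hx := h x (by simp)
    have hrest : ∀ y ∈ l, pvStripInstr y = "" ∨ pvStripInstr y = u :=
      fun y hy => h y (by simp [hy])
    rcases hx with hx | hx
    · have hmem' : ∃ y ∈ l, pvStripInstr y = u := by
        rcases hmem with ⟨y, hy, hyu⟩
        rcases List.mem_cons.mp hy with rfl | hy'
        · rw [hx] at hyu; exact absurd hyu.symm hu
        · exact ⟨y, hy', hyu⟩
      simp [List.foldl_cons, pvStepB, hx]
      exact ih hrest hmem'
    · simp [List.foldl_cons, pvStepB, hx, hu]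
      exact foldl_stepB_some l u hrest

-- ===== VERDICT (by name: the statement is the Claim_ definition above) =====
theorem extract_unique_instruction_spec : Claim_equal_extract_unique_instruction := by
  intro pair_data label _hD hPre
  obtain ⟨hne, hlen⟩ := hPre
  set D := PySem.Set.discard (PySem.Set.ofList (pair_data.map pvStripInstr)) "" with hD
  obtain ⟨u, hDu⟩ := List.length_eq_one_iff.mp hlen
  have hmemD : ∀ x, x ∈ D ↔ (x ∈ pair_data.map pvStripInstr ∧ x ≠ "") := by
    intro x
    rw [hD, PySem.Set.mem_discard, PySem.Set.mem_ofList]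
  have huD : u ∈ D := by simp [hDu]
  have hu_ne : u ≠ "" := ((hmemD u).mp huD).2
  have hu_mem : u ∈ pair_data.map pvStripInstr := ((hmemD u).mp huD).1
  have hall : ∀ x ∈ pair_data, pvStripInstr x = "" ∨ pvStripInstr x = u := by
    intro x hx
    by_cases hxe : pvStripInstr x = ""
    · exact Or.inl hxe
    · right
      have : pvStripInstr x ∈ D :=
        (hmemD _).mpr ⟨List.mem_map_of_mem hx, hxe⟩
      simpa [hDu] using this
  have hex : ∃ x ∈ pair_data, pvStripInstr x = u := by
    rcases List.mem_map.mp hu_mem with ⟨x, hx, hxu⟩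
    exact ⟨x, hx, hxu⟩
  unfold Spec_extract_unique_instruction extract_unique_instruction extract_unique_instruction_alt
  rw [← hD]
  simp only [hne, if_false]
  rw [foldl_stepB_none pair_data u hu_ne hall hex, hDu]
  simp
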